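-- pv_equiv track=rewrite | github.com/YoungCan-Wang/daily_stock_analysi_youngcan_fork | market_analyzer.py | _normalize_index_code
-- ===== SOURCE A (Python) =====
-- def _normalize_index_code(raw: object) -> str:
--     if raw is None:
--         return ""
--     s = str(raw).strip()
--     if not s:
--         return ""
--     digits = "".join(ch for ch in s if ch.isdigit())
--     if len(digits) >= 6:
--         return digits[-6:]
--     return digits
-- ===== SOURCE B (Python) =====
-- def _normalize_index_code(raw: object) -> str:
--     if raw is None:
--         return ""
--     s = str(raw).strip()
--     if not s:
--         return ""
--     buf = []
--     for ch in reversed(s):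
--         if ch.isdigit():
--             buf.append(ch)
--             if len(buf) == 6:
--                 break
--     return "".join(reversed(buf))
-- ===== Notes on version B (the rewrite author's own statement) =====
-- stated objective: alternative
-- what changed: Instead of filtering all digits into a string and slicing its last six, B scans the stripped string from the right, collecting digit characters and breaking as soon as six are found, then reverses the buffer.
import Mathlib
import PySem

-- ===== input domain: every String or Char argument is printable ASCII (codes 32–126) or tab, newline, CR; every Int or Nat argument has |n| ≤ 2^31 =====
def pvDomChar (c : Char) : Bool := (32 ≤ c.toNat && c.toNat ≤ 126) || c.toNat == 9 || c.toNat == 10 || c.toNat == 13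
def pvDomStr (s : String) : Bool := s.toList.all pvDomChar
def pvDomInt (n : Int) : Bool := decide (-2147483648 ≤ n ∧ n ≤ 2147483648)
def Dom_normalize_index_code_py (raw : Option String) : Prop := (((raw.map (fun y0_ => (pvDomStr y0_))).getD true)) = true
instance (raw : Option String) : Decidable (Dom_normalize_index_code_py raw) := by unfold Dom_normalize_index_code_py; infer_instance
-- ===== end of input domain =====

-- B scans the stripped string from the right, collecting digits and stopping at six,
-- instead of A's filter-everything-then-slice; objective: alternative (same cost).


-- ===== PORT A =====
def normalize_index_code_py (raw : Option String) : String :=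
  match raw with
  | none => ""
  | some r =>
    let s := (PySem.Str.strip r).toList
    if s.isEmpty then ""
    else
      let digits := s.filter PySem.Chars.isdigit
      if 6 ≤ digits.length then String.ofList (PySem.List.slice digits (some (-6)) none)
      else String.ofList digits

-- ===== PORT B =====
-- the reversed(s) loop of Source B: append each digit to buf, break once buf holds 6
def pvScanDigits : List Char → List Char → List Char
  | [], buf => buf
  | c :: rest, buf =>
    if PySem.Chars.isdigit c then
      let buf' := buf ++ [c]
      if buf'.length = 6 then buf' else pvScanDigits rest buf'
    else pvScanDigits rest buf

def normalize_index_code_py_alt (raw : Option String) : String :=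
  match raw with
  | none => ""
  | some r =>
    let s := (PySem.Str.strip r).toList
    if s.isEmpty then ""
    else String.ofList (pvScanDigits s.reverse []).reverse

-- ===== PRECONDITION & SPEC =====
def Spec_normalize_index_code_py (raw : Option String) (out : String) : Prop := out = normalize_index_code_py_alt raw
instance (raw : Option String) (out : String) : Decidable (Spec_normalize_index_code_py raw out) := by unfold Spec_normalize_index_code_py; infer_instance

-- ===== CLAIM (what is proved, stated in full; the proofs are below) =====
def Claim_equal_normalize_index_code_py : Prop := ∀ (raw : Option String), Dom_normalize_index_code_py raw → Spec_normalize_index_code_py raw (normalize_index_code_py raw)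

-- ===== LEMMAS AND PROOFS =====

-- the scan collects, in order, the first (6 - buf.length) digits of its input onto buf
theorem pvScanDigits_eq (l : List Char) : ∀ (buf : List Char), buf.length < 6 →
    pvScanDigits l buf = buf ++ (l.filter PySem.Chars.isdigit).take (6 - buf.length) := by
  induction l with
  | nil => intro buf _; simp [pvScanDigits]
  | cons c rest ih =>
    intro buf hb
    by_cases hd : PySem.Chars.isdigit c
    · by_cases h6 : buf.length + 1 = 6
      · simp [pvScanDigits, hd, h6]
        have : 6 - buf.length = 1 := by omega
        simp [this]
      · have hlt : (buf ++ [c]).length < 6 := by simp; omega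
        simp only [pvScanDigits, hd, if_true]
        rw [if_neg (by simpa using h6), ih _ hlt]
        have : 6 - buf.length = (6 - (buf ++ [c]).length) + 1 := by simp; omega
        simp [hd, this, List.take_succ_cons]
    · simp only [pvScanDigits, hd]
      rw [ih _ hb]
      simp [hd]

-- last-6 as reverse ∘ take 6 ∘ reverse
theorem reverse_take_reverse (d : List Char) :
    ((d.reverse.take 6).reverse) = d.drop (d.length - 6) := by
  have h := List.rtake_eq_reverse_take_reverse (l := d) (n := 6)
  rw [List.rtake] at h
  exact h.symm

theorem chars_eq (s : List Char) :
    (pvScanDigits s.reverse []).reverse =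
      (if 6 ≤ (s.filter PySem.Chars.isdigit).length then
        PySem.List.slice (s.filter PySem.Chars.isdigit) (some (-6)) none
      else (s.filter PySem.Chars.isdigit)) := by
  set d := s.filter PySem.Chars.isdigit with hd
  have hscan : pvScanDigits s.reverse [] = d.reverse.take 6 := by
    rw [pvScanDigits_eq s.reverse [] (by simp)]
    simp [hd, List.filter_reverse]
  rw [hscan, reverse_take_reverse]
  by_cases h : 6 ≤ d.length
  · rw [if_pos h, PySem.List.slice_from_neg_ofNat d 6 (by omega)]
  · rw [if_neg h]
    have : d.length - 6 = 0 := by omega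
    simp [this]

-- ===== VERDICT (by name: the statement is the Claim_ definition above) =====
theorem normalize_index_code_py_spec : Claim_equal_normalize_index_code_py := by
  intro raw _
  unfold Spec_normalize_index_code_py normalize_index_code_py normalize_index_code_py_alt
  match raw with
  | none => rfl
  | some r =>
    dsimp only
    by_cases he : (PySem.Str.strip r).toList.isEmpty
    · rw [if_pos he, if_pos he]
    · rw [if_neg he, if_neg he, chars_eq, apply_ite String.ofList]
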